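-- pv_equiv track=rewrite | github.com/DanielKalicki/s2v_linker | batchers/wiki_links_batch.py | find_all_links
-- ===== SOURCE A (Python) =====
-- import copy
--
-- def get_links(title, linkset):
--     try:
--         return linkset[title]['links']
--     except KeyError:
--         return []
--
-- def find_all_links(title, linkset, depth=100):
--     links = set()
--     links.update(get_links(title, linkset))
--     links_length = len(links)
--     for i in range(0, depth):
--         for link in copy.copy(links):
--             links.update(get_links(link, linkset))
--         if len(links) == links_length:
--             break
--         else:
--             links_length = len(links)
--     return links
-- ===== SOURCE B (Python) =====
-- def get_links(title, linkset):
--     try: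
--         return linkset[title]['links']
--     except KeyError:
--         return []
--
-- def find_all_links(title, linkset, depth=100):
--     seen = set(get_links(title, linkset))
--     frontier = list(seen)
--     rounds = depth
--     while frontier and rounds > 0:
--         nxt = []
--         for node in frontier:
--             for nb in get_links(node, linkset):
--                 if nb not in seen:
--                     seen.add(nb)
--                     nxt.append(nb)
--         frontier = nxt
--         rounds -= 1
--     return seen
-- ===== Notes on version B (the rewrite author's own statement) =====
-- stated objective: faster
-- what changed: A rescans the entire reached set every round (links.update(get_links(link)) for every element again and again); B runs a frontier-based BFS that expands only the nodes newly added in the previous round, tracking the frontier explicitly.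
import Mathlib
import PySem

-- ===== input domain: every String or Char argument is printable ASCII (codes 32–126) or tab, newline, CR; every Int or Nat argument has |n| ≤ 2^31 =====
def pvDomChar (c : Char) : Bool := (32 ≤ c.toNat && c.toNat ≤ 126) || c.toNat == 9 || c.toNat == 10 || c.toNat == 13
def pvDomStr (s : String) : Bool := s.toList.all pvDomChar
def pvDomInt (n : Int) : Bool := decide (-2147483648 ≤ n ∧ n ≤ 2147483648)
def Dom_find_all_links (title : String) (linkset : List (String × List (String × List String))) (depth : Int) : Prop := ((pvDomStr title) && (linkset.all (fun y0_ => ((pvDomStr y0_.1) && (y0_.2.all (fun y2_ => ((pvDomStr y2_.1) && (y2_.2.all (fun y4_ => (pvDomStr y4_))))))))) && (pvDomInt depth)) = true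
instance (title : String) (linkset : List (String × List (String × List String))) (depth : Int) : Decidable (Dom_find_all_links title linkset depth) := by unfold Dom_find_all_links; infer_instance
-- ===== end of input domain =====

-- B replaces A's whole-set rescan each round by a frontier-based BFS that expands
-- only the nodes newly added in the previous round (objective: faster, asymptotic).

-- ===== PORT A =====
-- get_links(title, linkset): linkset[title]['links'], KeyError (either lookup) → []
def pv_get_links (title : String) (linkset : List (String × List (String × List String))) : List String :=
  match PySem.Dict.get? (PySem.Dict.mk linkset) title with
  | none => []
  | some v =>
    match PySem.Dict.get? (PySem.Dict.mk v) "links" with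
    | none => []
    | some ls => ls

-- the 'for i in range(0, depth)' loop: fuel = number of remaining iterations;
-- links_length is the variable of the same name; one round folds 'links.update(get_links(link))'
-- over the snapshot copy.copy(links).
def pvA_loop (linkset : List (String × List (String × List String))) :
    Nat → PySem.Set String → Int → PySem.Set String
  | 0, links, _ => links
  | n + 1, links, links_length =>
    let links' := List.foldl (fun a l => PySem.Set.update a (pv_get_links l linkset)) links links
    if PySem.Set.len links' = links_length then links'
    else pvA_loop linkset n links' (PySem.Set.len links')

def find_all_links (title : String) (linkset : List (String × List (String × List String))) (depth : Int) : List String :=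
  let links := PySem.Set.update PySem.Set.empty (pv_get_links title linkset)
  pvA_loop linkset depth.toNat links (PySem.Set.len links)

-- ===== PORT B =====
-- inner loop of B: 'for nb in ys: if nb not in seen: seen.add(nb); nxt.append(nb)'
def pvB_scan : List String → PySem.Set String → List String → PySem.Set String × List String
  | [], seen, nxt => (seen, nxt)
  | nb :: ys, seen, nxt =>
    if PySem.Set.contains seen nb then pvB_scan ys seen nxt
    else pvB_scan ys (PySem.Set.add seen nb) (nxt ++ [nb])

-- 'for node in frontier: …' building (seen, nxt)
def pvB_expand (linkset : List (String × List (String × List String))) :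
    List String → PySem.Set String → List String → PySem.Set String × List String
  | [], seen, nxt => (seen, nxt)
  | node :: rest, seen, nxt =>
    let p := pvB_scan (pv_get_links node linkset) seen nxt
    pvB_expand linkset rest p.1 p.2

-- 'while frontier and rounds > 0: …'; fuel = remaining positive rounds
def pvB_loop (linkset : List (String × List (String × List String))) :
    Nat → PySem.Set String → List String → PySem.Set String
  | _, seen, [] => seen
  | 0, seen, _ => seen
  | n + 1, seen, frontier =>
    let p := pvB_expand linkset frontier seen []
    pvB_loop linkset n p.1 p.2

def find_all_links_alt (title : String) (linkset : List (String × List (String × List String))) (depth : Int) : List String :=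
  let p := pvB_scan (pv_get_links title linkset) PySem.Set.empty []
  pvB_loop linkset depth.toNat p.1 p.2

-- ===== PRECONDITION & SPEC =====
def Spec_find_all_links (title : String) (linkset : List (String × List (String × List String))) (depth : Int) (out : List String) : Prop := out = find_all_links_alt title linkset depth
instance (title : String) (linkset : List (String × List (String × List String))) (depth : Int) (out : List String) : Decidable (Spec_find_all_links title linkset depth out) := by unfold Spec_find_all_links; infer_instance

-- ===== CLAIM (what is proved, stated in full; the proofs are below) =====
def Claim_equal_find_all_links : Prop := ∀ (title : String) (linkset : List (String × List (String × List String))) (depth : Int), Dom_find_all_links title linkset depth → Spec_find_all_links title linkset depth (find_all_links title linkset depth)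

-- ===== LEMMAS AND PROOFS =====

-- updating with elements already present is a no-op
lemma pv_update_of_subset (s : PySem.Set String) (xs : List String)
    (h : ∀ y ∈ xs, y ∈ s) : PySem.Set.update s xs = s := by
  rw [PySem.Set.update_eq_append_filter]
  have hnil : List.filter (fun y => !PySem.Set.contains s y) (PySem.Set.ofList xs) = [] := by
    apply List.filter_eq_nil_iff.mpr
    intro y hy
    simp [h y ((PySem.Set.mem_ofList _ _).mp hy)]
  rw [hnil, List.append_nil]

-- membership is preserved by update
lemma pv_mem_update_of_mem (s : PySem.Set String) (xs : List String) {y : String}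
    (h : y ∈ s) : y ∈ PySem.Set.update s xs := by
  simp [PySem.Set.mem_update, h]

-- B's scan computes Set.update on its first component
lemma pvB_scan_fst (ys : List String) (s : PySem.Set String) (nxt : List String) :
    (pvB_scan ys s nxt).1 = PySem.Set.update s ys := by
  induction ys generalizing s nxt with
  | nil => simp [pvB_scan, PySem.Set.update_nil]
  | cons y ys ih =>
    rw [pvB_scan, PySem.Set.update_cons]
    by_cases h : PySem.Set.contains s y
    · rw [if_pos h, ih, PySem.Set.add_of_mem ((PySem.Set.contains_iff _ _).mp h)]
    · rw [if_neg h, ih]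

-- B's scan appends exactly the new elements, to both components
lemma pvB_scan_delta (ys : List String) (s : PySem.Set String) (nxt : List String) :
    ∃ δ, pvB_scan ys s nxt = (s ++ δ, nxt ++ δ) := by
  induction ys generalizing s nxt with
  | nil => exact ⟨[], by simp [pvB_scan]⟩
  | cons y ys ih =>
    rw [pvB_scan]
    by_cases h : PySem.Set.contains s y
    · rw [if_pos h]; exact ih s nxt
    · rw [if_neg h]
      obtain ⟨δ, hδ⟩ := ih (PySem.Set.add s y) (nxt ++ [y])
      refine ⟨y :: δ, ?_⟩
      rw [hδ, PySem.Set.add_of_not_mem (fun hm => h ((PySem.Set.contains_iff _ _).mpr hm))]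
      simp

-- B's expand is A's fold over the same list
lemma pvB_expand_fst (linkset : List (String × List (String × List String)))
    (F : List String) (s : PySem.Set String) (nxt : List String) :
    (pvB_expand linkset F s nxt).1
      = List.foldl (fun a l => PySem.Set.update a (pv_get_links l linkset)) s F := by
  induction F generalizing s nxt with
  | nil => simp [pvB_expand]
  | cons f F ih => rw [pvB_expand, List.foldl_cons, ← pvB_scan_fst _ _ nxt]; exact ih _ _

lemma pvB_expand_delta (linkset : List (String × List (String × List String)))
    (F : List String) (s : PySem.Set String) (nxt : List String) :
    ∃ δ, pvB_expand linkset F s nxt = (s ++ δ, nxt ++ δ) := by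
  induction F generalizing s nxt with
  | nil => exact ⟨[], by simp [pvB_expand]⟩
  | cons f F ih =>
    rw [pvB_expand]
    obtain ⟨δ₁, h₁⟩ := pvB_scan_delta (pv_get_links f linkset) s nxt
    obtain ⟨δ₂, h₂⟩ := ih (s ++ δ₁) (nxt ++ δ₁)
    refine ⟨δ₁ ++ δ₂, ?_⟩
    rw [h₁]; simpa [List.append_assoc] using h₂

-- membership is preserved by the round fold
lemma pv_mem_fold (linkset : List (String × List (String × List String)))
    (F : List String) (s : PySem.Set String) {y : String} (h : y ∈ s) :
    y ∈ List.foldl (fun a l => PySem.Set.update a (pv_get_links l linkset)) s F := by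
  induction F generalizing s with
  | nil => simpa using h
  | cons f F ih => exact ih _ (pv_mem_update_of_mem _ _ h)

-- after a round, every processed node's links are in the result
lemma pv_fold_saturates (linkset : List (String × List (String × List String)))
    (F : List String) (s : PySem.Set String) :
    ∀ l ∈ F, ∀ y ∈ pv_get_links l linkset,
      y ∈ List.foldl (fun a l => PySem.Set.update a (pv_get_links l linkset)) s F := by
  induction F generalizing s with
  | nil => simp
  | cons f F ih =>
    intro l hl y hy
    rw [List.foldl_cons]
    rcases List.mem_cons.mp hl with rfl | hl
    · exact pv_mem_fold linkset F _ ((PySem.Set.mem_update _ _ _).mpr (Or.inr hy))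
    · exact ih _ l hl y hy

-- saturated prefix of the snapshot contributes nothing
lemma pv_fold_drop_prefix (linkset : List (String × List (String × List String)))
    (P F : List String) (s : PySem.Set String)
    (h : ∀ x ∈ P, ∀ y ∈ pv_get_links x linkset, y ∈ s) :
    List.foldl (fun a l => PySem.Set.update a (pv_get_links l linkset)) s (P ++ F)
      = List.foldl (fun a l => PySem.Set.update a (pv_get_links l linkset)) s F := by
  induction P with
  | nil => simp
  | cons x P ih =>
    rw [List.cons_append, List.foldl_cons,
        pv_update_of_subset s _ (h x (List.mem_cons_self))]
    exact ih (fun z hz => h z (List.mem_cons_of_mem _ hz))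

lemma pvB_loop_nil (linkset : List (String × List (String × List String)))
    (n : Nat) (s : PySem.Set String) : pvB_loop linkset n s [] = s := by
  cases n <;> rfl

-- main loop correspondence: s = P ++ F with P saturated
lemma pv_loop_eq (linkset : List (String × List (String × List String))) :
    ∀ (n : Nat) (s : PySem.Set String) (P F : List String),
    s = P ++ F →
    (∀ x ∈ P, ∀ y ∈ pv_get_links x linkset, y ∈ s) →
    pvA_loop linkset n s (PySem.Set.len s) = pvB_loop linkset n s F := by
  intro n
  induction n with
  | zero => intro s P F _ _; cases F <;> rfl
  | succ n ih =>
    intro s P F hs hsat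
    subst hs
    cases F with
    | nil =>
      have hfix : List.foldl (fun a l => PySem.Set.update a (pv_get_links l linkset))
          (P ++ []) (P ++ []) = P ++ [] := by
        rw [pv_fold_drop_prefix linkset P [] (P ++ []) hsat, List.foldl_nil]
      simp only [pvA_loop, pvB_loop]
      rw [hfix, if_pos rfl]
    | cons f F' =>
      have hA : List.foldl (fun a l => PySem.Set.update a (pv_get_links l linkset))
            (P ++ f :: F') (P ++ f :: F')
          = List.foldl (fun a l => PySem.Set.update a (pv_get_links l linkset))
            (P ++ f :: F') (f :: F') :=
        pv_fold_drop_prefix linkset P (f :: F') _ hsat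
      obtain ⟨δ, hδ⟩ := pvB_expand_delta linkset (f :: F') (P ++ f :: F') []
      have hfst := pvB_expand_fst linkset (f :: F') (P ++ f :: F') []
      have hs' : List.foldl (fun a l => PySem.Set.update a (pv_get_links l linkset))
          (P ++ f :: F') (f :: F') = (P ++ f :: F') ++ δ := by
        rw [← hfst, hδ]
      simp only [pvA_loop, pvB_loop, hδ, hA, hs']
      cases δ with
      | nil => rw [if_pos (by simp)]; simp [pvB_loop_nil]
      | cons d δ' =>
        rw [if_neg (by simp only [PySem.Set.len]; simp; omega)]
        have hsatAll : ∀ x ∈ P ++ f :: F', ∀ y ∈ pv_get_links x linkset,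
            y ∈ (P ++ f :: F') ++ d :: δ' := by
          have h0 := pv_fold_saturates linkset (P ++ f :: F') (P ++ f :: F')
          rw [hA, hs'] at h0
          exact h0
        have := ih ((P ++ f :: F') ++ d :: δ') (P ++ f :: F') (d :: δ') rfl hsatAll
        simpa using this

-- ===== VERDICT (by name: the statement is the Claim_ definition above) =====
theorem find_all_links_spec : Claim_equal_find_all_links := by
  intro title linkset depth _
  unfold Spec_find_all_links find_all_links find_all_links_alt
  obtain ⟨δ, hδ⟩ := pvB_scan_delta (pv_get_links title linkset) PySem.Set.empty []
  have hfst : (pvB_scan (pv_get_links title linkset) PySem.Set.empty []).1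
      = PySem.Set.update PySem.Set.empty (pv_get_links title linkset) := pvB_scan_fst _ _ _
  have h2 : PySem.Set.update PySem.Set.empty (pv_get_links title linkset) = δ := by
    rw [← hfst, hδ]; rfl
  show pvA_loop linkset depth.toNat (PySem.Set.update PySem.Set.empty (pv_get_links title linkset))
        (PySem.Set.len (PySem.Set.update PySem.Set.empty (pv_get_links title linkset)))
      = pvB_loop linkset depth.toNat (pvB_scan (pv_get_links title linkset) PySem.Set.empty []).1
        (pvB_scan (pv_get_links title linkset) PySem.Set.empty []).2
  rw [hδ, h2]
  exact pv_loop_eq linkset depth.toNat δ [] δ rfl (by simp)
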